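-- pv_equiv track=rewrite | github.com/hwanggu-corgi/algorithm-practice | Programmers/algorithm/2_삼각_달팽이/main.py | traverse_left
-- ===== SOURCE A (Python) =====
-- def traverse_left(answer, i, current_value, layer, n):
--     steps = 0
--     depth = 0
--
--     if n == 1:
--         answer[i] = current_value
--         return i, current_value
--
--     while depth < n:
--         answer[i] = current_value
--
--         if depth == (n-1):
--             break
--
--         steps += 1
--         i += steps + (2 * layer)
--         depth += 1
--         current_value += 1
--
--     return i, current_value
-- ===== SOURCE B (Python) =====
-- def traverse_left(answer, i, current_value, layer, n):
--     for d in range(n):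
--         answer[i + d * (d + 1) // 2 + 2 * layer * d] = current_value + d
--     k = max(n - 1, 0)
--     return i + k * (k + 1) // 2 + 2 * layer * k, current_value + k
-- ===== Notes on version B (the rewrite author's own statement) =====
-- stated objective: simpler
-- what changed: B replaces A's while loop threading running steps/depth/i/current_value accumulators (plus a redundant n==1 special case) by direct indexing: each write's target index is computed in closed form i + d*(d+1)//2 + 2*layer*d, and the returned pair is the closed form at k = max(n-1, 0).
import Mathlib
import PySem

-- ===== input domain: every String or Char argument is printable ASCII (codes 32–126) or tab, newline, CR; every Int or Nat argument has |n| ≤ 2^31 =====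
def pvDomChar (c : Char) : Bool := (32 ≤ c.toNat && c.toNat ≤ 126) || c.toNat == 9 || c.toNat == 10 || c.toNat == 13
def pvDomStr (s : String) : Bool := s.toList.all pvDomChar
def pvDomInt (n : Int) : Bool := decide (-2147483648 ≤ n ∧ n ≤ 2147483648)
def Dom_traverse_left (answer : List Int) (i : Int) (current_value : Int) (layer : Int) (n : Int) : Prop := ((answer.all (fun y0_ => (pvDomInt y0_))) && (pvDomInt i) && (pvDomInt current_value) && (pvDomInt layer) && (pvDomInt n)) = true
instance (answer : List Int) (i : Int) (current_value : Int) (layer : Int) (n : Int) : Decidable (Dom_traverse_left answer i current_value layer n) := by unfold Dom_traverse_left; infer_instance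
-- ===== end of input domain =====

-- B replaces A's accumulator-threading while loop by closed-form target indices and a closed-form
-- returned pair (objective: simpler).  Both programs mutate `answer` in place in identical ways on
-- every input admitted by Pre_; the equivalence proved below is about the RETURN value.

-- ===== PORT A =====
-- the while loop of A: state (answer, i, current_value, steps, depth), exactly A's updates in A's order
def tlLoop (ans : List Int) (i : Int) (cv : Int) (steps : Int) (depth : Int) (layer : Int) (n : Int) : Int × Int :=
  if _h : depth < n then
    -- answer[i] = current_value; pySetD is the total form of the write (Pre_ guarantees it is in range)
    let ans' := PySem.List.pySetD ans i cv
    if depth = n - 1 then (i, cv)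
    else tlLoop ans' (i + (steps + 1) + 2 * layer) (cv + 1) (steps + 1) (depth + 1) layer n
  else (i, cv)
termination_by (n - depth).toNat
decreasing_by omega

def traverse_left (answer : List Int) (i : Int) (current_value : Int) (layer : Int) (n : Int) : Int × Int :=
  if n = 1 then
    let _ := PySem.List.pySetD answer i current_value   -- answer[i] = current_value
    (i, current_value)
  else tlLoop answer i current_value 0 0 layer n

-- ===== PORT B =====
def traverse_left_alt (answer : List Int) (i : Int) (current_value : Int) (layer : Int) (n : Int) : Int × Int :=
  -- for d in range(n): answer[i + d*(d+1)//2 + 2*layer*d] = current_value + d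
  let _ := (List.range n.toNat).foldl
    (fun a d => PySem.List.pySetD a
      (i + PySem.Int.floordiv ((d : Int) * ((d : Int) + 1)) 2 + 2 * layer * (d : Int))
      (current_value + (d : Int))) answer
  let k : Int := max (n - 1) 0
  (i + PySem.Int.floordiv (k * (k + 1)) 2 + 2 * layer * k, current_value + k)

-- ===== PRECONDITION & SPEC =====
-- index of the d-th write of both programs
def pvWriteIdx (i : Int) (layer : Int) (d : Nat) : Int := i + ((d * (d + 1)) / 2 : Nat) + 2 * layer * d

-- A raises IndexError unless every written index i + d*(d+1)//2 + 2*layer*d (d = 0..n-1) is in range;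
-- since each index value is hit by at most two d's, that forces n ≤ 4*len(answer)+4, so the first conjunct
-- excludes nothing A returns on and merely keeps the bounded quantifier cheap to decide.
def Pre_traverse_left (answer : List Int) (i : Int) (current_value : Int) (layer : Int) (n : Int) : Prop :=
  n ≤ 4 * (answer.length : Int) + 4 ∧
  ∀ d ∈ List.range (min n.toNat (4 * answer.length + 5)),
    PySem.Raise.InRange answer.length (pvWriteIdx i layer d)
instance (answer : List Int) (i : Int) (current_value : Int) (layer : Int) (n : Int) : Decidable (Pre_traverse_left answer i current_value layer n) := by unfold Pre_traverse_left; infer_instance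

def pvWitness_traverse_left : List Int × Int × Int × Int × Int := ([0, 0, 0], 0, 1, 0, 2)

def Spec_traverse_left (answer : List Int) (i : Int) (current_value : Int) (layer : Int) (n : Int) (out : Int × Int) : Prop := out = traverse_left_alt answer i current_value layer n
instance (answer : List Int) (i : Int) (current_value : Int) (layer : Int) (n : Int) (out : Int × Int) : Decidable (Spec_traverse_left answer i current_value layer n out) := by unfold Spec_traverse_left; infer_instance

-- ===== CLAIM (what is proved, stated in full; the proofs are below) =====
def Claim_equal_traverse_left : Prop := ∀ (answer : List Int) (i : Int) (current_value : Int) (layer : Int) (n : Int), Dom_traverse_left answer i current_value layer n → Pre_traverse_left answer i current_value layer n → Spec_traverse_left answer i current_value layer n (traverse_left answer i current_value layer n)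

-- ===== LEMMAS AND PROOFS =====

-- the triangular numbers, as the proofs' handle on d*(d+1)//2
def pvTri : Nat → Int
  | 0 => 0
  | m + 1 => pvTri m + (m + 1)

theorem pvTri_closed (m : Nat) : PySem.Int.floordiv ((m : Int) * ((m : Int) + 1)) 2 = pvTri m := by
  have h2 : (m : Int) * ((m : Int) + 1) = 2 * pvTri m := by
    induction m with
    | zero => simp [pvTri]
    | succ k ih => simp only [pvTri]; push_cast; push_cast at ih; ring_nf; ring_nf at ih; omega
  rw [h2, PySem.Int.floordiv_eq_ediv_of_pos (by norm_num)]
  exact Int.mul_ediv_cancel_left _ (by norm_num)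

theorem tlLoop_eq (m : Nat) : ∀ (ans : List Int) (i cv steps depth layer n : Int),
    n - depth = (m : Int) + 1 →
    tlLoop ans i cv steps depth layer n
      = (i + (m : Int) * steps + pvTri m + 2 * layer * (m : Int), cv + (m : Int)) := by
  induction m with
  | zero =>
    intro ans i cv steps depth layer n h
    rw [tlLoop]
    rw [dif_pos (by omega), if_pos (by omega)]
    simp [pvTri]
  | succ k ih =>
    intro ans i cv steps depth layer n h
    rw [tlLoop]
    rw [dif_pos (by omega), if_neg (by omega)]
    rw [ih _ _ _ _ _ _ _ (by omega)]
    simp only [pvTri, Prod.mk.injEq]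
    constructor <;> (push_cast; ring)

-- ===== VERDICT (by name: the statement is the Claim_ definition above) =====
theorem traverse_left_spec : Claim_equal_traverse_left := by
  intro answer i cv layer n _ _
  unfold Spec_traverse_left traverse_left traverse_left_alt
  by_cases h1 : n = 1
  · subst h1; norm_num [PySem.Int.floordiv]
  · rw [if_neg h1]
    by_cases h0 : n ≤ 0
    · rw [tlLoop]
      rw [dif_neg (by omega)]
      have hk : max (n - 1) 0 = 0 := by omega
      simp [hk, PySem.Int.floordiv]
    · -- n ≥ 2
      have hm : n - 0 = ((n - 1).toNat : Int) + 1 := by omega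
      rw [tlLoop_eq _ _ _ _ _ _ _ _ hm]
      have hk : max (n - 1) 0 = ((n - 1).toNat : Int) := by omega
      simp only [hk, pvTri_closed, Prod.mk.injEq]
      exact ⟨by ring, trivial⟩
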